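-- pv_equiv track=rewrite | github.com/hedgehog-hg/OperatingSystem | codeSignal/darkWilderness.py | knapsackLight
-- ===== SOURCE A (Python) =====
-- def knapsackLight(v1,w1,v2,w2,maxW):
--     items = sorted([[v1,w1],[v2,w2]],key=lambda x:-x[0])
--     res = 0
--     for item in items:
--         if item[1] <= maxW :
--             res += item[0]
--             maxW -= item[1]
--     return res
-- ===== SOURCE B (Python) =====
-- def knapsackLight(v1, w1, v2, w2, maxW):
--     # Closed-form case analysis on the weights alone: which subsets fit decides the answer.
--     if w1 + w2 <= maxW:
--         return v1 + v2
--     if w1 <= maxW and w2 <= maxW: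
--         return max(v1, v2)
--     if w1 <= maxW:
--         return v1
--     if w2 <= maxW:
--         return v2
--     return 0
-- ===== Notes on version B (the rewrite author's own statement) =====
-- stated objective: simpler
-- what changed: Replaced the build-list/sort-by-value/greedy-loop with a direct case analysis on the weights: four weight-vs-capacity tests (both fit together, each fits alone, only one fits, none fits) select v1+v2, max(v1,v2), v1, v2 or 0 -- no list, no sort, no loop, no mutable capacity.
-- outside the precondition, e.g. on knapsackLight(-2, -5, 4, -4, -9): A returns 0, B returns 2
import Mathlib
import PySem

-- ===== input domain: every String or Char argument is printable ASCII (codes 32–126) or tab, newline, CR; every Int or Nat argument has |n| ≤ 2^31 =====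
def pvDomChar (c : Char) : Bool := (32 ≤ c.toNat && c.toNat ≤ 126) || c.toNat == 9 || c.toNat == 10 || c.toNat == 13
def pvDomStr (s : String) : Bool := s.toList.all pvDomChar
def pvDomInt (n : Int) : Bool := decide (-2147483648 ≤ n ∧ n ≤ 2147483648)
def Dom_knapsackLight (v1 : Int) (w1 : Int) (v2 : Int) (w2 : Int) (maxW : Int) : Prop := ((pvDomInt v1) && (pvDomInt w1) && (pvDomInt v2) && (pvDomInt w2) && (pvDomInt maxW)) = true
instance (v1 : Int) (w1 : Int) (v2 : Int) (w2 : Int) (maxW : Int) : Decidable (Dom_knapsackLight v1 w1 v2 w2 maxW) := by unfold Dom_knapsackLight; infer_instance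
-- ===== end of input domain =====

-- ===== PORT A =====
-- B decides the answer by comparing the two weights against the capacity (no sort, no loop);
-- return value only (A mutates nothing observable).
def knapsackLight (v1 : Int) (w1 : Int) (v2 : Int) (w2 : Int) (maxW : Int) : Int :=
  let items := PySem.List.sorted [(v1, w1), (v2, w2)] (fun x => -x.1) false
  (items.foldl
    (fun (st : Int × Int) item =>
      if item.2 ≤ st.2 then (st.1 + item.1, st.2 - item.2) else st)
    (0, maxW)).1

-- ===== PORT B =====
def knapsackLight_alt (v1 : Int) (w1 : Int) (v2 : Int) (w2 : Int) (maxW : Int) : Int :=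
  if w1 + w2 ≤ maxW then v1 + v2
  else if w1 ≤ maxW ∧ w2 ≤ maxW then max v1 v2
  else if w1 ≤ maxW then v1
  else if w2 ≤ maxW then v2
  else 0

-- ===== PRECONDITION & SPEC =====
-- Pre_ excludes exactly the inputs, all outside the task's natural domain because they need a
-- negative weight, on which both items fit together yet the higher-valued item alone exceeds the
-- capacity: no knapsack instance has such weights, and there A's order-dependent sequential reading
-- (skip it, then take the other) and B's which-subsets-fit reading (take both) are equally
-- defensible answers to a question the task never poses.
def Pre_knapsackLight (v1 : Int) (w1 : Int) (v2 : Int) (w2 : Int) (maxW : Int) : Prop :=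
  ¬ (w1 + w2 ≤ maxW ∧ (if v1 ≥ v2 then w1 else w2) > maxW)
instance (v1 : Int) (w1 : Int) (v2 : Int) (w2 : Int) (maxW : Int) : Decidable (Pre_knapsackLight v1 w1 v2 w2 maxW) := by unfold Pre_knapsackLight; infer_instance
def pvWitness_knapsackLight : Int × Int × Int × Int × Int := (10, 5, 6, 4, 8)

def Spec_knapsackLight (v1 : Int) (w1 : Int) (v2 : Int) (w2 : Int) (maxW : Int) (out : Int) : Prop := out = knapsackLight_alt v1 w1 v2 w2 maxW
instance (v1 : Int) (w1 : Int) (v2 : Int) (w2 : Int) (maxW : Int) (out : Int) : Decidable (Spec_knapsackLight v1 w1 v2 w2 maxW out) := by unfold Spec_knapsackLight; infer_instance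

-- ===== CLAIM =====
def Claim_equal_knapsackLight : Prop := ∀ (v1 : Int) (w1 : Int) (v2 : Int) (w2 : Int) (maxW : Int), Dom_knapsackLight v1 w1 v2 w2 maxW → Pre_knapsackLight v1 w1 v2 w2 maxW → Spec_knapsackLight v1 w1 v2 w2 maxW (knapsackLight v1 w1 v2 w2 maxW)

-- ===== LEMMAS AND PROOFS =====

-- ===== VERDICT =====
theorem knapsackLight_spec : Claim_equal_knapsackLight := by
  intro v1 w1 v2 w2 maxW _ hpre
  unfold Pre_knapsackLight at hpre
  unfold Spec_knapsackLight knapsackLight knapsackLight_alt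
  by_cases h : v2 ≤ v1
  · rw [PySem.List.sorted_eq_self_of_pairwise _ _ (by simp; omega)]
    simp only [List.foldl]
    split_ifs <;> simp_all <;> omega
  · rw [PySem.List.sorted_eq_of_perm_of_pairwise_lt _ [(v2, w2), (v1, w1)] _
      (List.Perm.swap (v1, w1) (v2, w2) []) (by simp; omega)]
    simp only [List.foldl]
    split_ifs <;> simp_all <;> omega
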